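-- pv_equiv track=rewrite | github.com/thechadturner/alinghi | server_python/scripts/ac40/0_parse_db.py | _tutc_source_column
-- ===== SOURCE A (Python) =====
-- def _tutc_source_column(columns: list, table_name: str) -> str | None:
--     """
--     After dot→underscore (and optional _100hz suffix), return the column name that holds
--     UTC time (tUTC), or None if not found.
--     """
--     cols = list(columns)
--     lower = {c.lower(): c for c in cols}
--     is_100hz = table_name == "AC40_ECC.PLC_100HZ_log"
--     if is_100hz:
--         if "tutc_100hz" in lower:
--             return lower["tutc_100hz"]
--         for c in cols:
--             if c.lower().endswith("_tutc_100hz"):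
--                 return c
--         return None
--     if "tutc" in lower:
--         return lower["tutc"]
--     for c in cols:
--         cl = c.lower()
--         if cl.endswith("_tutc") and not cl.endswith("_tutc_100hz"):
--             return c
--     return None
-- ===== SOURCE B (Python) =====
-- def _tutc_source_column(columns: list, table_name: str) -> str | None:
--     """Single pass: track the last exact match and the first suffix match."""
--     target = "tutc_100hz" if table_name == "AC40_ECC.PLC_100HZ_log" else "tutc"
--     suffix = "_" + target
--     exact = None
--     fallback = None
--     for c in columns:
--         cl = c.lower()
--         if cl == target:
--             exact = c
--         if fallback is None and cl.endswith(suffix):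
--             fallback = c
--     return exact if exact is not None else fallback
-- ===== Notes on version B (the rewrite author's own statement) =====
-- stated objective: simpler
-- what changed: B replaces A's lowercase-index dict plus two separate scans by a single pass that keeps the last exact lowercase match and the first suffix match, choosing target/suffix once up front and dropping the dead _tutc_100hz exclusion (no dict is built, one traversal).
import Mathlib
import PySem

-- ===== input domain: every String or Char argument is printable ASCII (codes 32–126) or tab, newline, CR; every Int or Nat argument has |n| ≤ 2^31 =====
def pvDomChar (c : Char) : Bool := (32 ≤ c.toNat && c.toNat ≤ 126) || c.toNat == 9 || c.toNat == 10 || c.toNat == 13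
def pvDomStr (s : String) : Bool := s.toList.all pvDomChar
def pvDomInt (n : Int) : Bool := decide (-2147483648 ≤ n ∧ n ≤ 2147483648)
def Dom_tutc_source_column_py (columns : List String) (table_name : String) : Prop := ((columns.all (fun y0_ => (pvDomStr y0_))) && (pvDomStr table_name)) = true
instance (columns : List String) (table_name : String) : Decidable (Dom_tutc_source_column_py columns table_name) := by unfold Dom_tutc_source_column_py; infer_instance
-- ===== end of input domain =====

-- B replaces A's lowercase-index dict and two scans by one pass keeping the last exact match and the first suffix match (objective: simpler).


-- ===== PORT A =====
def tutc_source_column_py (columns : List String) (table_name : String) : Option String :=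
  let cols := columns
  let lower := cols.foldl (fun d c => d.insert (PySem.Str.lower c) c) (PySem.Dict.empty : PySem.Dict String String)
  let is_100hz := table_name == "AC40_ECC.PLC_100HZ_log"
  if is_100hz then
    match lower.get? "tutc_100hz" with
    | some v => some v
    | none => cols.find? (fun c => PySem.Str.endswith (PySem.Str.lower c) "_tutc_100hz")
  else
    match lower.get? "tutc" with
    | some v => some v
    | none =>
      cols.find? (fun c =>
        let cl := PySem.Str.lower c
        PySem.Str.endswith cl "_tutc" && !PySem.Str.endswith cl "_tutc_100hz")

-- ===== PORT B =====
def tutc_source_column_py_alt (columns : List String) (table_name : String) : Option String :=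
  let target := if table_name == "AC40_ECC.PLC_100HZ_log" then "tutc_100hz" else "tutc"
  let suffix := "_" ++ target
  let st := columns.foldl (fun (st : Option String × Option String) c =>
    let cl := PySem.Str.lower c
    ((if cl == target then some c else st.1),
     (if st.2.isNone && PySem.Str.endswith cl suffix then some c else st.2))) (none, none)
  match st.1 with
  | some e => some e
  | none => st.2

-- ===== PRECONDITION & SPEC =====
def Spec_tutc_source_column_py (columns : List String) (table_name : String) (out : Option String) : Prop := out = tutc_source_column_py_alt columns table_name
instance (columns : List String) (table_name : String) (out : Option String) : Decidable (Spec_tutc_source_column_py columns table_name out) := by unfold Spec_tutc_source_column_py; infer_instance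

-- ===== CLAIM (what is proved, stated in full; the proofs are below) =====
def Claim_equal_tutc_source_column_py : Prop := ∀ (columns : List String) (table_name : String), Dom_tutc_source_column_py columns table_name → Spec_tutc_source_column_py columns table_name (tutc_source_column_py columns table_name)

-- ===== LEMMAS AND PROOFS =====

-- lookup in the lowercase-index dict = last column whose lowercase equals the key
theorem dict_fold_get? (cols : List String) (d : PySem.Dict String String) (k : String) :
    (cols.foldl (fun d c => d.insert (PySem.Str.lower c) c) d).get? k
      = (match cols.reverse.find? (fun c => PySem.Str.lower c == k) with
         | some c => some c
         | none => d.get? k) := by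
  induction cols generalizing d with
  | nil => simp
  | cons c cs ih =>
    simp only [List.foldl_cons]
    rw [ih]
    simp only [List.reverse_cons, List.find?_append, List.find?_cons, List.find?_nil]
    cases h : cs.reverse.find? (fun c => PySem.Str.lower c == k) with
    | some v => simp
    | none =>
      cases hbe : (PySem.Str.lower c == k) with
      | true => simp [eq_of_beq hbe]
      | false => simp [PySem.Dict.get?_insert, Ne.symm (ne_of_beq_false hbe)]

-- B's loop state after processing cols from state (e, f)
theorem b_fold_state (cols : List String) (target suffix : String) (e f : Option String) :
    cols.foldl (fun (st : Option String × Option String) c =>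
      let cl := PySem.Str.lower c
      ((if cl == target then some c else st.1),
       (if st.2.isNone && PySem.Str.endswith cl suffix then some c else st.2))) (e, f)
      = ((match cols.reverse.find? (fun c => PySem.Str.lower c == target) with
          | some c => some c
          | none => e),
         (match f with
          | some v => some v
          | none => cols.find? (fun c => PySem.Str.endswith (PySem.Str.lower c) suffix))) := by
  induction cols generalizing e f with
  | nil => cases f <;> simp
  | cons c cs ih =>
    simp only [List.foldl_cons]
    rw [ih]
    simp only [List.reverse_cons, List.find?_append, List.find?_cons, List.find?_nil]
    cases hbe : (PySem.Str.lower c == target) <;>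
      cases hs : PySem.Str.endswith (PySem.Str.lower c) suffix <;>
        cases f <;>
          cases h : cs.reverse.find? (fun c => PySem.Str.lower c == target) <;>
            simp [hbe, hs, h]

-- a char list ending with "_tutc" cannot also end with "_tutc_100hz"
theorem endswith_tutc_not_100hz (l : List Char)
    (h : PySem.Chars.endswith l ['_','t','u','t','c'] = true) :
    PySem.Chars.endswith l ['_','t','u','t','c','_','1','0','0','h','z'] = false := by
  by_contra hcon
  have h2 : PySem.Chars.endswith l ['_','t','u','t','c','_','1','0','0','h','z'] = true := by
    cases hh : PySem.Chars.endswith l ['_','t','u','t','c','_','1','0','0','h','z'] <;> simp_all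
  rw [PySem.Chars.endswith_iff] at h h2
  rcases List.suffix_or_suffix_of_suffix h h2 with hs | hs <;> exact absurd hs (by decide)

-- ===== VERDICT (by name: the statement is the Claim_ definition above) =====
theorem tutc_source_column_py_spec : Claim_equal_tutc_source_column_py := by
  intro columns table_name _
  unfold Spec_tutc_source_column_py tutc_source_column_py tutc_source_column_py_alt
  have hA100 := dict_fold_get? columns PySem.Dict.empty "tutc_100hz"
  have hA := dict_fold_get? columns PySem.Dict.empty "tutc"
  have hB100 := b_fold_state columns "tutc_100hz" ("_" ++ "tutc_100hz") none none
  have hB := b_fold_state columns "tutc" ("_" ++ "tutc") none none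
  by_cases ht : table_name = "AC40_ECC.PLC_100HZ_log"
  · have hbt : (table_name == "AC40_ECC.PLC_100HZ_log") = true := by simp [ht]
    simp only [hbt, if_true, hA100, hB100, PySem.Dict.get?_empty]
    cases hr : columns.reverse.find? (fun c => PySem.Str.lower c == "tutc_100hz") <;> simp
  · have hbt : (table_name == "AC40_ECC.PLC_100HZ_log") = false := by simp [ht]
    simp only [hbt, Bool.false_eq_true, if_false, hA, hB, PySem.Dict.get?_empty]
    cases hr : columns.reverse.find? (fun c => PySem.Str.lower c == "tutc") with
    | some v => simp
    | none =>
      simp only []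
      congr 1
      funext c
      cases h5 : PySem.Chars.endswith (PySem.Chars.lower c.toList) ['_','t','u','t','c']
      · simp [h5]
      · simp [h5, endswith_tutc_not_100hz _ h5]
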